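-- pv_equiv track=rewrite | github.com/invite-you/newapps | backend/scrapers/collection_utils.py | select_primary_pair
-- ===== SOURCE A (Python) =====
-- from typing import List, Tuple, Optional
--
-- DEFAULT_LANGUAGE = "en"
--
-- DEFAULT_COUNTRY = "US"
--
-- def select_primary_pair(
--     optimized_pairs: List[Tuple[str, str]],
--     preferred_language: str = DEFAULT_LANGUAGE,
--     preferred_country: str = DEFAULT_COUNTRY,
-- ) -> Tuple[str, str]:
--     """최적화된 쌍에서 기준 (language, country)를 선택합니다."""
--     preferred_upper = preferred_country.upper()
--     for lang, country in optimized_pairs: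
--         if lang == preferred_language and country.upper() == preferred_upper:
--             return (lang, country)
--     for lang, country in optimized_pairs:
--         if lang == preferred_language:
--             return (lang, country)
--     if optimized_pairs:
--         return optimized_pairs[0]
--     return (preferred_language, preferred_country)
-- ===== SOURCE B (Python) =====
-- def select_primary_pair(
--     optimized_pairs,
--     preferred_language="en",
--     preferred_country="US",
-- ):
--     preferred_upper = preferred_country.upper()
--
--     def rank(pair):
--         lang, country = pair
--         if lang != preferred_language:
--             return 2
--         return 0 if country.upper() == preferred_upper else 1
--
--     if not optimized_pairs:
--         return (preferred_language, preferred_country)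
--     best = optimized_pairs[0]
--     for p in optimized_pairs[1:]:
--         if rank(p) < rank(best):
--             best = p
--     return best
-- ===== Notes on version B (the rewrite author's own statement) =====
-- stated objective: alternative
-- what changed: Replaces A's staged searches (exact match scan, then language-only scan, then head fallback) with a rank-minimisation fold: each pair gets a priority 0/1/2 and the first pair of minimal rank is kept by a strict-improvement accumulator.
import Mathlib
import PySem

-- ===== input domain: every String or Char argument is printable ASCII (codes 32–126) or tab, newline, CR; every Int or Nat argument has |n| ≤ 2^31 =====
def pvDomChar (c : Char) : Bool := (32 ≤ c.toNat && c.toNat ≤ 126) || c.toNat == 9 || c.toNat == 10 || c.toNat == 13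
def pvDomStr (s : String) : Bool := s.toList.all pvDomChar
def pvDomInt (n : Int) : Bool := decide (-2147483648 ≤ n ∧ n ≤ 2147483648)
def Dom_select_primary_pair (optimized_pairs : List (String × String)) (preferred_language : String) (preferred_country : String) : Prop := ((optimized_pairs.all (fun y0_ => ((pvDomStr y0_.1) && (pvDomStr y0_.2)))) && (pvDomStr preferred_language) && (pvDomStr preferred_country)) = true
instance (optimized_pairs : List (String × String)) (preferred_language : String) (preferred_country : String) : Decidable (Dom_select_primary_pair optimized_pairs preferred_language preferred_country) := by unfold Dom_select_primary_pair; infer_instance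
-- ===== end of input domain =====

-- B replaces A's staged searches by a rank-minimisation fold (priority 0/1/2, keep the first minimal pair); same O(n) cost, no speed claim.

-- ===== PORT A =====
-- A's first loop: first pair with lang == preferred_language and country.upper() == preferred_upper
def pvFindExact (preferred_language preferred_upper : String) : List (String × String) → Option (String × String)
  | [] => none
  | (lang, country) :: rest =>
    if lang == preferred_language && PySem.Str.upper country == preferred_upper then some (lang, country)
    else pvFindExact preferred_language preferred_upper rest

-- A's second loop: first pair with lang == preferred_language
def pvFindLang (preferred_language : String) : List (String × String) → Option (String × String)
  | [] => none
  | (lang, country) :: rest =>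
    if lang == preferred_language then some (lang, country)
    else pvFindLang preferred_language rest

def select_primary_pair (optimized_pairs : List (String × String)) (preferred_language : String) (preferred_country : String) : String × String :=
  let preferred_upper := PySem.Str.upper preferred_country
  match pvFindExact preferred_language preferred_upper optimized_pairs with
  | some p => p
  | none =>
    match pvFindLang preferred_language optimized_pairs with
    | some p => p
    | none =>
      match optimized_pairs with
      | p :: _ => p
      | [] => (preferred_language, preferred_country)

-- ===== PORT B =====
-- Source B's rank(pair): 2 if the language differs, else 0 for a case-insensitive country hit, else 1
def pvRank (preferred_language preferred_upper : String) (p : String × String) : Nat :=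
  if p.1 != preferred_language then 2
  else if PySem.Str.upper p.2 == preferred_upper then 0 else 1

def select_primary_pair_alt (optimized_pairs : List (String × String)) (preferred_language : String) (preferred_country : String) : String × String :=
  let preferred_upper := PySem.Str.upper preferred_country
  match optimized_pairs with
  | [] => (preferred_language, preferred_country)
  | best0 :: rest =>
    rest.foldl (fun best p =>
      if pvRank preferred_language preferred_upper p < pvRank preferred_language preferred_upper best then p else best) best0

-- ===== PRECONDITION & SPEC =====
def Spec_select_primary_pair (optimized_pairs : List (String × String)) (preferred_language : String) (preferred_country : String) (out : String × String) : Prop := out = select_primary_pair_alt optimized_pairs preferred_language preferred_country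
instance (optimized_pairs : List (String × String)) (preferred_language : String) (preferred_country : String) (out : String × String) : Decidable (Spec_select_primary_pair optimized_pairs preferred_language preferred_country out) := by unfold Spec_select_primary_pair; infer_instance

-- ===== CLAIM =====
def Claim_equal_select_primary_pair : Prop := ∀ (optimized_pairs : List (String × String)) (preferred_language : String) (preferred_country : String), Dom_select_primary_pair optimized_pairs preferred_language preferred_country → Spec_select_primary_pair optimized_pairs preferred_language preferred_country (select_primary_pair optimized_pairs preferred_language preferred_country)

-- ===== LEMMAS AND PROOFS =====
-- Characterisation of B's fold: from a seed of rank 0 it never moves; from rank 1 it moves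
-- exactly to the first exact match; from rank 2 it moves to the first exact match, else the
-- first language match, else stays.
theorem pvFold_eq (pl pu : String) (l : List (String × String)) (best : String × String) :
    l.foldl (fun b p => if pvRank pl pu p < pvRank pl pu b then p else b) best =
      if pvRank pl pu best = 0 then best
      else if pvRank pl pu best = 1 then (pvFindExact pl pu l).getD best
      else ((pvFindExact pl pu l).orElse (fun _ => pvFindLang pl l)).getD best := by
  induction l generalizing best with
  | nil =>
    simp only [List.foldl_nil, pvFindExact, pvFindLang, Option.getD_none]
    split_ifs <;> rfl
  | cons hd tl ih =>
    obtain ⟨lang, country⟩ := hd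
    rw [List.foldl_cons, ih]
    by_cases h1 : (lang == pl) = true <;>
      by_cases h2 : (PySem.Str.upper country == pu) = true <;>
      by_cases b1 : (best.1 == pl) = true <;>
      by_cases b2 : (PySem.Str.upper best.2 == pu) = true <;>
      cases hfe : pvFindExact pl pu tl <;>
      cases hfl : pvFindLang pl tl <;>
      simp [pvRank, pvFindExact, pvFindLang, bne, h1, h2, b1, b2, hfe, hfl, Option.orElse]

-- ===== VERDICT =====
theorem select_primary_pair_spec : Claim_equal_select_primary_pair := by
  intro ps pl pc _
  unfold Spec_select_primary_pair
  cases ps with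
  | nil => rfl
  | cons hd tl =>
    obtain ⟨lang, country⟩ := hd
    have halt : select_primary_pair_alt ((lang, country) :: tl) pl pc =
        tl.foldl (fun b p => if pvRank pl (PySem.Str.upper pc) p < pvRank pl (PySem.Str.upper pc) b then p else b)
          (lang, country) := rfl
    rw [halt, pvFold_eq]
    by_cases h1 : (lang == pl) = true <;>
      by_cases h2 : (PySem.Str.upper country == PySem.Str.upper pc) = true <;>
      cases hfe : pvFindExact pl (PySem.Str.upper pc) tl <;>
      cases hfl : pvFindLang pl tl <;>
      simp [select_primary_pair, pvFindExact, pvFindLang, pvRank, bne, h1, h2, hfe, hfl, Option.orElse]
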